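-- pv_equiv track=rewrite | github.com/magicalplugins/printlay | backend/services/pdf_parser.py | _find_positions_layer
-- ===== SOURCE A (Python) =====
-- POSITION_LAYER_CANDIDATES = ("POSITIONS", "POSITION", "SLOTS", "SLOT")
--
-- def _find_positions_layer(names: list[str], hint: str | None) -> str | None:
--     if hint:
--         for name in names:
--             if name.lower() == hint.lower():
--                 return name
--     for candidate in POSITION_LAYER_CANDIDATES:
--         for name in names:
--             if name.lower() == candidate.lower():
--                 return name
--     return None
-- ===== SOURCE B (Python) =====
-- POSITION_LAYER_CANDIDATES = ("POSITIONS", "POSITION", "SLOTS", "SLOT")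
--
-- def _find_positions_layer(names: list[str], hint: str | None) -> str | None:
--     # One pass over names: rank each name by which target (hint first, then the
--     # fixed candidates) it matches, and keep the first name with the best rank.
--     targets = []
--     if hint:
--         targets.append(hint.lower())
--     for c in POSITION_LAYER_CANDIDATES:
--         targets.append(c.lower())
--     best_rank = len(targets)
--     best = None
--     for name in names:
--         low = name.lower()
--         if low in targets:
--             r = targets.index(low)
--             if r < best_rank:
--                 best_rank = r
--                 best = name
--     return best
-- ===== Notes on version B (the rewrite author's own statement) =====
-- stated objective: faster
-- what changed: Instead of A's staged scans (a full pass over names for the hint, then one per candidate, re-lowercasing on every comparison), B builds the priority target list once and makes a SINGLE pass over names, ranking each name by which target it matches and keeping the first name with the best rank.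
import Mathlib
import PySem

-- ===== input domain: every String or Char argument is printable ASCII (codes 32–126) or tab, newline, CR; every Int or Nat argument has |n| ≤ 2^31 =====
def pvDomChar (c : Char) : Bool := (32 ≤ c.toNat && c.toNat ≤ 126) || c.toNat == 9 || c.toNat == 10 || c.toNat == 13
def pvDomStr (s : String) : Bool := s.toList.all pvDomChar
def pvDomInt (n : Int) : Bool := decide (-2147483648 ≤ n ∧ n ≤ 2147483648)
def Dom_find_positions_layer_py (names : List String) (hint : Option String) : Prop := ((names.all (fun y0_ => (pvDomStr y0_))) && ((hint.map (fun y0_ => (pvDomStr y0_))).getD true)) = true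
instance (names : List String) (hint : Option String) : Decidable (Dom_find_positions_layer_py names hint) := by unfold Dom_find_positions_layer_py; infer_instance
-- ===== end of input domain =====

-- B replaces A's staged scans (one pass over names per hint/candidate) by a SINGLE pass
-- over names that ranks each name by which target it matches and keeps the first
-- name with the best (smallest) rank; return value is identical.

def pvCandidates : List String := ["POSITIONS", "POSITION", "SLOTS", "SLOT"]

-- ===== PORT A =====
-- inner 'for name in names: if name.lower() == target.lower(): return name'
def pvAScan (names : List String) (target : String) : Option String :=
  match names with
  | [] => none
  | n :: rest =>
    if PySem.Str.lower n = PySem.Str.lower target then some n else pvAScan rest target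

-- 'for candidate in POSITION_LAYER_CANDIDATES: …'
def pvACandLoop (cands : List String) (names : List String) : Option String :=
  match cands with
  | [] => none
  | c :: rest =>
    match pvAScan names c with
    | some n => some n
    | none => pvACandLoop rest names

def find_positions_layer_py (names : List String) (hint : Option String) : Option String :=
  match hint with
  | some h =>
    if h = "" then pvACandLoop pvCandidates names
    else
      match pvAScan names h with
      | some n => some n
      | none => pvACandLoop pvCandidates names
  | none => pvACandLoop pvCandidates names

-- ===== PORT B =====
-- 'targets = []; if hint: targets.append(hint.lower()); for c in …: targets.append(c.lower())'
def pvTargets (hint : Option String) : List String :=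
  (match hint with
   | some h => if h = "" then [] else [PySem.Str.lower h]
   | none => []) ++ pvCandidates.map PySem.Str.lower

-- 'for name in names: low = name.lower(); if low in targets: r = targets.index(low); …'
-- ('low in targets' + 'targets.index(low)' ported together as one match on index?,
--  which is none exactly when 'low not in targets')
def pvBLoop (ts : List String) (names : List String) (bestRank : Nat) (best : Option String) : Option String :=
  match names with
  | [] => best
  | n :: rest =>
    match PySem.List.index? ts (PySem.Str.lower n) with
    | some r => if r < bestRank then pvBLoop ts rest r (some n) else pvBLoop ts rest bestRank best
    | none => pvBLoop ts rest bestRank best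

def find_positions_layer_py_alt (names : List String) (hint : Option String) : Option String :=
  let ts := pvTargets hint
  pvBLoop ts names ts.length none

-- ===== PRECONDITION & SPEC =====
def Spec_find_positions_layer_py (names : List String) (hint : Option String) (out : Option String) : Prop := out = find_positions_layer_py_alt names hint
instance (names : List String) (hint : Option String) (out : Option String) : Decidable (Spec_find_positions_layer_py names hint out) := by unfold Spec_find_positions_layer_py; infer_instance

-- ===== CLAIM (what is proved, stated in full; the proofs are below) =====
def Claim_equal_find_positions_layer_py : Prop := ∀ (names : List String) (hint : Option String), Dom_find_positions_layer_py names hint → Spec_find_positions_layer_py names hint (find_positions_layer_py names hint)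

-- ===== LEMMAS AND PROOFS =====

-- staged scan over a list of ALREADY-LOWERED targets (proof-side common form)
def pvStaged (ts : List String) (names : List String) : Option String :=
  match ts with
  | [] => none
  | t :: us =>
    match names.find? (fun n => PySem.Str.lower n == t) with
    | some x => some x
    | none => pvStaged us names

lemma pvAScan_eq_find? (names : List String) (t : String) :
    pvAScan names t = names.find? (fun n => PySem.Str.lower n == PySem.Str.lower t) := by
  induction names with
  | nil => rfl
  | cons n rest ih =>
    unfold pvAScan
    rw [List.find?_cons]
    by_cases h : PySem.Str.lower n = PySem.Str.lower t
    · simp [h]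
    · have hb : (PySem.Str.lower n == PySem.Str.lower t) = false := by simp [h]
      simp [h, hb, ih]

lemma pvACandLoop_eq_staged (cands names : List String) :
    pvACandLoop cands names = pvStaged (cands.map PySem.Str.lower) names := by
  induction cands with
  | nil => rfl
  | cons c rest ih =>
    unfold pvACandLoop
    simp only [List.map_cons, pvStaged, pvAScan_eq_find?, ih]

lemma find_positions_layer_py_eq_staged (names : List String) (hint : Option String) :
    find_positions_layer_py names hint = pvStaged (pvTargets hint) names := by
  unfold find_positions_layer_py pvTargets
  cases hint with
  | none => simpa using pvACandLoop_eq_staged pvCandidates names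
  | some h =>
    by_cases hh : h = ""
    · simpa [hh] using pvACandLoop_eq_staged pvCandidates names
    · simp only [hh, if_false, List.cons_append, List.nil_append, pvStaged,
        pvAScan_eq_find?, pvACandLoop_eq_staged]

lemma pvStaged_nil_names (ts : List String) : pvStaged ts [] = none := by
  induction ts with
  | nil => rfl
  | cons t us ih => simp [pvStaged, ih]

lemma pvStaged_skip (ts : List String) (n : String) (ns : List String)
    (h : PySem.Str.lower n ∉ ts) :
    pvStaged ts (n :: ns) = pvStaged ts ns := by
  induction ts with
  | nil => rfl
  | cons t us ih =>
    have hb : (PySem.Str.lower n == t) = false := by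
      simp only [List.mem_cons, not_or] at h
      simp [h.1]
    simp only [pvStaged, List.find?_cons, hb]
    rw [ih (fun hm => h (List.mem_cons_of_mem _ hm))]

lemma pvStaged_hit (ts : List String) (n : String) (ns : List String) (k : Nat)
    (h : PySem.List.index? ts (PySem.Str.lower n) = some k) :
    pvStaged ts (n :: ns) =
      match pvStaged (ts.take k) ns with
      | some x => some x
      | none => some n := by
  induction ts generalizing k with
  | nil => simp [PySem.List.index?_eq_idxOf?, List.idxOf?] at h
  | cons t us ih =>
    by_cases ht : t = PySem.Str.lower n
    · have h0 : k = 0 := by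
        rw [ht, PySem.List.index?_cons_self] at h
        exact (Option.some_inj.mp h).symm
      subst h0
      have hb : (PySem.Str.lower n == t) = true := by simp [ht]
      simp [pvStaged, hb]
    · rw [PySem.List.index?_cons_of_ne us ht] at h
      cases hu : PySem.List.index? us (PySem.Str.lower n) with
      | none => rw [hu] at h; simp at h
      | some k' =>
        rw [hu] at h
        simp only [Option.map_some] at h
        have hk : k = k' + 1 := (Option.some_inj.mp h).symm
        subst hk
        have hb : (PySem.Str.lower n == t) = false := by simp [Ne.symm ht]
        simp only [pvStaged, List.find?_cons, hb, List.take_succ_cons]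
        rw [ih k' hu]
        cases hf : List.find? (fun n => PySem.Str.lower n == t) ns with
        | some x => simp
        | none =>
          cases pvStaged (us.take k') ns with
          | some x => simp
          | none => simp

lemma index?_take (us : List String) (br : Nat) (v : String) :
    PySem.List.index? (us.take br) v =
      (PySem.List.index? us v).bind (fun k => if k < br then some k else none) := by
  induction us generalizing br with
  | nil => simp [PySem.List.index?_eq_idxOf?, List.idxOf?]
  | cons t us ih =>
    cases br with
    | zero =>
      simp only [List.take_zero]
      cases h : PySem.List.index? (t :: us) v with
      | none => simp [PySem.List.index?_eq_idxOf?, List.idxOf?]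
      | some k => simp [PySem.List.index?_eq_idxOf?, List.idxOf?]
    | succ b =>
      simp only [List.take_succ_cons]
      by_cases ht : t = v
      · subst ht
        rw [PySem.List.index?_cons_self, PySem.List.index?_cons_self]
        simp
      · rw [PySem.List.index?_cons_of_ne _ ht, PySem.List.index?_cons_of_ne _ ht, ih]
        cases h : PySem.List.index? us v with
        | none => simp
        | some k =>
          simp only [Option.map_some, Option.bind_some]
          by_cases hk : k < b
          · simp [hk, Nat.succ_lt_succ hk]
          · have h2 : ¬ k + 1 < b + 1 := by omega
            simp [hk, h2]

lemma pvBLoop_eq_staged (ts : List String) (ns : List String) :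
    ∀ (br : Nat) (best : Option String),
      pvBLoop ts ns br best =
        match pvStaged (ts.take br) ns with
        | some x => some x
        | none => best := by
  induction ns with
  | nil => intro br best; simp [pvBLoop, pvStaged_nil_names]
  | cons n rest ih =>
    intro br best
    cases hr : PySem.List.index? ts (PySem.Str.lower n) with
    | none =>
      have hstep : pvBLoop ts (n :: rest) br best = pvBLoop ts rest br best := by
        simp only [pvBLoop, hr]
      have hnm : PySem.Str.lower n ∉ ts.take br := fun hm =>
        ((PySem.List.index?_eq_none_iff ts _).mp hr) (List.mem_of_mem_take hm)
      rw [hstep, ih br best, pvStaged_skip _ _ _ hnm]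
    | some k =>
      have hstep : pvBLoop ts (n :: rest) br best =
          if k < br then pvBLoop ts rest k (some n) else pvBLoop ts rest br best := by
        simp only [pvBLoop, hr]
      rw [hstep]
      by_cases hk : k < br
      · have hrt : PySem.List.index? (ts.take br) (PySem.Str.lower n) = some k := by
          rw [index?_take, hr]; simp [hk]
        rw [if_pos hk, ih k (some n),
          pvStaged_hit (ts.take br) n rest k hrt, List.take_take]
        have hmin : min k br = k := by omega
        rw [hmin]
        cases pvStaged (ts.take k) rest with
        | some x => simp
        | none => simp
      · have hnm : PySem.Str.lower n ∉ ts.take br := by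
          intro hm
          have h2 := (PySem.List.index?_isSome_iff (ts.take br) _).mpr hm
          rw [index?_take, hr] at h2
          simp [hk] at h2
        rw [if_neg hk, ih br best, pvStaged_skip _ _ _ hnm]

-- ===== VERDICT (by name: the statement is the Claim_ definition above) =====
theorem find_positions_layer_py_spec : Claim_equal_find_positions_layer_py := by
  intro names hint _
  unfold Spec_find_positions_layer_py find_positions_layer_py_alt
  rw [find_positions_layer_py_eq_staged, pvBLoop_eq_staged]
  rw [List.take_length]
  cases pvStaged (pvTargets hint) names with
  | some x => simp
  | none => simp
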